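-- pv_equiv track=rewrite | github.com/baker-laboratory/Metallohydrolase_Enzyme_Design | Scripts/prepare_PDB_structure_into_theozyme.py | split_prefix_remark_suffix
-- ===== SOURCE A (Python) =====
-- from typing import List, Tuple, Dict, Set
--
-- def split_prefix_remark_suffix(all_lines: List[str]) -> Tuple[List[str], List[str], List[str]]:
--     """Split file into prefix (before the first REMARK 666), the REMARK 666 block, and suffix."""
--     prefix, remark_block, suffix = [], [], []
--     state = "prefix"
--     for raw in all_lines:
--         if state == "prefix":
--             if raw.startswith("REMARK 666"):
--                 state = "remark"
--                 remark_block.append(raw)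
--             else:
--                 prefix.append(raw)
--         elif state == "remark":
--             if raw.startswith("REMARK 666"):
--                 remark_block.append(raw)
--             else:
--                 state = "suffix"
--                 suffix.append(raw)
--         else:
--             suffix.append(raw)
--     return prefix, remark_block, suffix
-- ===== SOURCE B (Python) =====
-- from typing import List, Tuple
--
--
-- def _span(pred, xs):
--     """Longest prefix of xs satisfying pred, and the rest (fresh lists)."""
--     for k, x in enumerate(xs):
--         if not pred(x):
--             return xs[:k], xs[k:]
--     return xs[:], []
--
--
-- def split_prefix_remark_suffix(all_lines: List[str]) -> Tuple[List[str], List[str], List[str]]: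
--     is_remark = lambda line: line.startswith("REMARK 666")
--     prefix, rest = _span(lambda line: not is_remark(line), all_lines)
--     remark_block, suffix = _span(is_remark, rest)
--     return prefix, remark_block, suffix
-- ===== Notes on version B (the rewrite author's own statement) =====
-- stated objective: simpler
-- what changed: Replaces the three-state machine loop with two span (take-while/rest) splits: first at the first REMARK 666 line, then at the end of the contiguous REMARK 666 run.
import Mathlib
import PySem

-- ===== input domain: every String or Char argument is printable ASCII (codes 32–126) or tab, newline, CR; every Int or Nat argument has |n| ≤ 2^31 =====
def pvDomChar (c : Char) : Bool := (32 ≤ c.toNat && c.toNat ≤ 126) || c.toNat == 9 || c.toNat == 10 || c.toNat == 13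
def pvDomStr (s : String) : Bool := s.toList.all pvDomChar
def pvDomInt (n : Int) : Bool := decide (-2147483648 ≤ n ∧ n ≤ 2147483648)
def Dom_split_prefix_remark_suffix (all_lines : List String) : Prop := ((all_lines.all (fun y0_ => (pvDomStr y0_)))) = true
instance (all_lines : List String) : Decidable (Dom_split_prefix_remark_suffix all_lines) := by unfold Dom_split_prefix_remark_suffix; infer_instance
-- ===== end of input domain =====

-- B replaces A's three-state machine loop with two span (take-while / rest) splits; objective: simpler.

-- ===== PORT A =====
-- one step of A's for-loop over (state, prefix, remark_block, suffix)
def pvStepA (st : String × List String × List String × List String) (raw : String) :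
    String × List String × List String × List String :=
  let (state, pre, rem, suf) := st
  if state = "prefix" then
    if PySem.Str.startswith raw "REMARK 666" then ("remark", pre, rem ++ [raw], suf)
    else ("prefix", pre ++ [raw], rem, suf)
  else if state = "remark" then
    if PySem.Str.startswith raw "REMARK 666" then ("remark", pre, rem ++ [raw], suf)
    else ("suffix", pre, rem, suf ++ [raw])
  else (state, pre, rem, suf ++ [raw])

def split_prefix_remark_suffix (all_lines : List String) : List String × List String × List String :=
  (all_lines.foldl pvStepA ("prefix", [], [], [])).2

-- ===== PORT B =====
-- port of Source B's _span: first index where pred fails (enumerate loop), then the two slices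
def pvSpan (pred : String → Bool) (xs : List String) : List String × List String :=
  match xs.findIdx? (fun x => ! pred x) with
  | none => (xs, [])
  | some k => (xs.take k, xs.drop k)

def split_prefix_remark_suffix_alt (all_lines : List String) : List String × List String × List String :=
  let isRemark : String → Bool := fun line => PySem.Str.startswith line "REMARK 666"
  let (pre, rest) := pvSpan (fun line => ! isRemark line) all_lines
  let (blk, suf) := pvSpan isRemark rest
  (pre, blk, suf)

-- ===== PRECONDITION & SPEC =====
def Spec_split_prefix_remark_suffix (all_lines : List String) (out : List String × List String × List String) : Prop := out = split_prefix_remark_suffix_alt all_lines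
instance (all_lines : List String) (out : List String × List String × List String) : Decidable (Spec_split_prefix_remark_suffix all_lines out) := by unfold Spec_split_prefix_remark_suffix; infer_instance

-- ===== CLAIM (what is proved, stated in full; the proofs are below) =====
def Claim_equal_split_prefix_remark_suffix : Prop := ∀ (all_lines : List String), Dom_split_prefix_remark_suffix all_lines → Spec_split_prefix_remark_suffix all_lines (split_prefix_remark_suffix all_lines)

-- ===== LEMMAS AND PROOFS =====

theorem pvSpan_eq (pred : String → Bool) (xs : List String) :
    pvSpan pred xs = (xs.takeWhile pred, xs.dropWhile pred) := by
  induction xs with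
  | nil => simp [pvSpan]
  | cons x xs ih =>
    by_cases h : pred x
    · cases hf : xs.findIdx? (fun x => ! pred x) with
      | none =>
        simp [pvSpan, List.findIdx?_cons, h, hf] at ih ⊢
        simpa [hf] using ih
      | some k =>
        simp [pvSpan, List.findIdx?_cons, h, hf] at ih ⊢
        simpa [hf] using ih
    · simp [pvSpan, List.findIdx?_cons, h]

theorem pvFoldA_suffix (xs : List String) (pre rem suf : List String) :
    xs.foldl pvStepA ("suffix", pre, rem, suf) = ("suffix", pre, rem, suf ++ xs) := by
  induction xs generalizing suf with
  | nil => simp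
  | cons x xs ih => simp [pvStepA, ih]

theorem pvFoldA_remark (xs : List String) (pre rem suf : List String) :
    (xs.foldl pvStepA ("remark", pre, rem, suf)).2 =
      (pre, rem ++ xs.takeWhile (fun l => PySem.Str.startswith l "REMARK 666"),
        suf ++ xs.dropWhile (fun l => PySem.Str.startswith l "REMARK 666")) := by
  induction xs generalizing rem with
  | nil => simp
  | cons x xs ih =>
    by_cases h : PySem.Str.startswith x "REMARK 666"
    · simp [pvStepA, h, ih, -PySem.Str.startswith_eq]
    · simp [pvStepA, h, pvFoldA_suffix, -PySem.Str.startswith_eq]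

theorem pvFoldA_prefix (xs : List String) (pre rem suf : List String) :
    (xs.foldl pvStepA ("prefix", pre, rem, suf)).2 =
      (pre ++ xs.takeWhile (fun l => ! PySem.Str.startswith l "REMARK 666"),
        rem ++ (xs.dropWhile (fun l => ! PySem.Str.startswith l "REMARK 666")).takeWhile
          (fun l => PySem.Str.startswith l "REMARK 666"),
        suf ++ (xs.dropWhile (fun l => ! PySem.Str.startswith l "REMARK 666")).dropWhile
          (fun l => PySem.Str.startswith l "REMARK 666")) := by
  induction xs generalizing pre with
  | nil => simp
  | cons x xs ih =>
    by_cases h : PySem.Str.startswith x "REMARK 666"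
    · simp [pvStepA, h, pvFoldA_remark, -PySem.Str.startswith_eq]
    · simp [pvStepA, h, ih, -PySem.Str.startswith_eq]

-- ===== VERDICT (by name: the statement is the Claim_ definition above) =====
theorem split_prefix_remark_suffix_spec : Claim_equal_split_prefix_remark_suffix := by
  intro all_lines _
  unfold Spec_split_prefix_remark_suffix
  simp only [split_prefix_remark_suffix, split_prefix_remark_suffix_alt, pvSpan_eq,
    pvFoldA_prefix, List.nil_append]
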